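-- pv_equiv track=rewrite | github.com/N283T/gemmi-extra-id | scripts/test_complete_mode.py | _check_exact_match
-- ===== SOURCE A (Python) =====
-- def _check_exact_match(
--     gm_values: dict[str, int],
--     aw_values: dict[str, int],
-- ) -> bool:
--     """Check if two entity mappings have exactly the same values."""
--     gm_keys = set(gm_values.keys())
--     aw_keys = {str(k) for k in aw_values}
--     common = sorted(gm_keys & aw_keys)
--
--     if not common:
--         return True
--
--     aw_lookup = {str(k): v for k, v in aw_values.items()}
--
--     return all(gm_values[chain] == aw_lookup[chain] for chain in common)
-- ===== SOURCE B (Python) =====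
-- def _check_exact_match(
--     gm_values: dict[str, int],
--     aw_values: dict[str, int],
-- ) -> bool:
--     """Check if two entity mappings have exactly the same values."""
--     gm = sorted(gm_values.items(), key=lambda p: p[0])
--     aw = sorted(((str(k), v) for k, v in aw_values.items()), key=lambda p: p[0])
--     i = j = 0
--     while i < len(gm) and j < len(aw):
--         gk, gv = gm[i]
--         ak, av = aw[j]
--         if gk < ak:
--             i += 1
--         elif ak < gk:
--             j += 1
--         else:
--             if gv != av:
--                 return False
--             i += 1
--             j += 1
--     return True
-- ===== Notes on version B (the rewrite author's own statement) =====
-- stated objective: alternative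
-- what changed: Replaces A's set intersection + per-key hash lookups over the sorted common keys with a sort-merge join: both item lists are sorted by key and a single two-pointer merge scan compares values at equal keys, with no set construction and no dict lookups in the comparison phase.
import Mathlib
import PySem

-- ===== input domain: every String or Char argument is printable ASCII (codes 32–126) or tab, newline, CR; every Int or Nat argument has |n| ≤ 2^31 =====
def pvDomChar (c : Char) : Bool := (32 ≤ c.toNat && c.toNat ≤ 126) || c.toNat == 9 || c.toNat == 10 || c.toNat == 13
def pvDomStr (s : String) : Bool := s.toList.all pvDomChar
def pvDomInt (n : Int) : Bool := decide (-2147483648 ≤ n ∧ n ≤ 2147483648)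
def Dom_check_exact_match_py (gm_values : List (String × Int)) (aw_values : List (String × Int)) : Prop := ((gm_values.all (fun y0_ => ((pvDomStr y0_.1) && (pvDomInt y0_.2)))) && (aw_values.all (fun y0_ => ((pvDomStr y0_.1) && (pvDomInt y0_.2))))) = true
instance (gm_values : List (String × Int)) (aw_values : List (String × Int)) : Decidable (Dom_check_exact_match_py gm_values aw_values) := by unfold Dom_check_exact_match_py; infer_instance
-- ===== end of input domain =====

-- B replaces A's set intersection + per-key dict lookups by a sort-merge join:
-- both item lists sorted by key, then one two-pointer merge scan (alternative algorithm).

-- ===== PORT A =====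
-- Port of A. Each dict parameter is the Python dict built from the association list
-- (PySem.Dict.ofList: later duplicates overwrite). str(k) on a String key is the identity.
-- gm_values[chain] cannot raise: chain ∈ common ⊆ gm keys, so getD is exact.
def check_exact_match_py (gm_values : List (String × Int)) (aw_values : List (String × Int)) : Bool :=
  let gm_d := PySem.Dict.ofList gm_values
  let aw_d := PySem.Dict.ofList aw_values
  let gm_keys := PySem.Set.ofList gm_d.keys
  let aw_keys := PySem.Set.ofList (aw_d.keys.map (fun k => k))
  let common := PySem.List.sorted (gm_keys.inter aw_keys) (fun x => x) false
  if common.isEmpty then true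
  else
    let aw_lookup := PySem.Dict.ofList (aw_d.items.map (fun p => (p.1, p.2)))
    common.all (fun chain => gm_d.getD chain 0 == aw_lookup.getD chain 0)

-- ===== PORT B =====
-- the two-pointer while loop of Source B, as recursion on the two (remaining) sorted lists
def pvMergeScan : List (String × Int) → List (String × Int) → Bool
  | [], _ => true
  | _ :: _, [] => true
  | (gk, gv) :: t1, (ak, av) :: t2 =>
    if gk < ak then pvMergeScan t1 ((ak, av) :: t2)
    else if ak < gk then pvMergeScan ((gk, gv) :: t1) t2
    else if gv != av then false
    else pvMergeScan t1 t2
termination_by l1 l2 => l1.length + l2.length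

def check_exact_match_py_alt (gm_values : List (String × Int)) (aw_values : List (String × Int)) : Bool :=
  let gm := PySem.List.sorted (PySem.Dict.ofList gm_values).items (fun p => p.1) false
  let aw := PySem.List.sorted ((PySem.Dict.ofList aw_values).items.map (fun p => (p.1, p.2))) (fun p => p.1) false
  pvMergeScan gm aw

-- ===== PRECONDITION & SPEC =====
def Spec_check_exact_match_py (gm_values : List (String × Int)) (aw_values : List (String × Int)) (out : Bool) : Prop := out = check_exact_match_py_alt gm_values aw_values
instance (gm_values : List (String × Int)) (aw_values : List (String × Int)) (out : Bool) : Decidable (Spec_check_exact_match_py gm_values aw_values out) := by unfold Spec_check_exact_match_py; infer_instance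

-- ===== CLAIM (what is proved, stated in full; the proofs are below) =====
def Claim_equal_check_exact_match_py : Prop := ∀ (gm_values : List (String × Int)) (aw_values : List (String × Int)), Dom_check_exact_match_py gm_values aw_values → Spec_check_exact_match_py gm_values aw_values (check_exact_match_py gm_values aw_values)

-- ===== LEMMAS AND PROOFS =====

-- Rebuilding a dict from its own items gives the same dict.
theorem ofList_items_self (d : PySem.Dict String Int) (hnd : d.keys.Nodup) :
    PySem.Dict.ofList d.items = d := by
  apply PySem.Dict.ext
  have h := PySem.Dict.items_foldl_insert_fresh (l := d.items) (k := Prod.fst) (v := Prod.snd)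
    (d := PySem.Dict.empty) (by intro a _; exact PySem.Dict.contains_empty _) (by simpa [PySem.Dict.keys] using hnd)
  simpa [PySem.Dict.ofList] using h

theorem aw_lookup_eq (aw : List (String × Int)) :
    PySem.Dict.ofList ((PySem.Dict.ofList aw).items.map (fun p => (p.1, p.2))) = PySem.Dict.ofList aw := by
  rw [show (fun p : String × Int => (p.1, p.2)) = id from funext (fun p => rfl), List.map_id]
  exact ofList_items_self _ (PySem.Dict.nodup_keys_ofList aw)

-- sorting a dict's items by key yields a strictly key-increasing list

-- the agreement property both programs decide
def pvAgree (gm aw : List (String × Int)) : Prop :=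
  ∀ p ∈ gm, ∀ q ∈ aw, p.1 = q.1 → p.2 = q.2

-- the merge scan on strictly key-sorted lists decides pvAgree
theorem mergeScan_iff (l1 l2 : List (String × Int))
    (h1 : l1.Pairwise (fun a b => a.1 < b.1)) (h2 : l2.Pairwise (fun a b => a.1 < b.1)) :
    pvMergeScan l1 l2 = true ↔ pvAgree l1 l2 := by
  induction l1, l2 using pvMergeScan.induct with
  | case1 l2 => simp [pvMergeScan, pvAgree]
  | case2 x t => simp [pvMergeScan, pvAgree]
  | case3 gk gv t1 ak av t2 hlt ih =>
    rw [List.pairwise_cons] at h1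
    have ih' := ih h1.2 h2
    simp only [pvMergeScan, if_pos hlt, ih', pvAgree]
    constructor
    · intro h p hp q hq hek
      rcases List.mem_cons.1 hp with rfl | hp'
      · exfalso
        rcases List.mem_cons.1 hq with rfl | hq'
        · exact absurd hek (by simp only []; exact ne_of_lt hlt)
        · rw [List.pairwise_cons] at h2
          exact absurd hek (ne_of_lt (lt_trans hlt (h2.1 q hq')))
      · exact h p hp' q hq hek
    · intro h p hp q hq hek
      exact h p (List.mem_cons_of_mem _ hp) q hq hek
  | case4 gk gv t1 ak av t2 hnlt hlt ih =>
    rw [List.pairwise_cons] at h2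
    have ih' := ih h1 h2.2
    simp only [pvMergeScan, if_neg hnlt, if_pos hlt, ih', pvAgree]
    constructor
    · intro h p hp q hq hek
      rcases List.mem_cons.1 hq with rfl | hq'
      · exfalso
        rcases List.mem_cons.1 hp with rfl | hp'
        · exact absurd hek.symm (ne_of_lt hlt)
        · rw [List.pairwise_cons] at h1
          exact absurd hek.symm (ne_of_lt (lt_trans hlt (h1.1 p hp')))
      · exact h p hp q hq' hek
    · intro h p hp q hq hek
      exact h p hp q (List.mem_cons_of_mem _ hq) hek
  | case5 gk gv t1 ak av t2 hnlt1 hnlt2 hne =>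
    have hke : gk = ak := le_antisymm (le_of_not_gt hnlt2) (le_of_not_gt hnlt1)
    simp only [pvMergeScan, if_neg hnlt1, if_neg hnlt2, if_pos hne]
    constructor
    · intro hc; exact absurd hc (by simp)
    · intro h
      exact absurd (h (gk, gv) List.mem_cons_self (ak, av) List.mem_cons_self hke)
        (by simpa using hne)
  | case6 gk gv t1 ak av t2 hnlt1 hnlt2 hnne ih =>
    have hke : gk = ak := le_antisymm (le_of_not_gt hnlt2) (le_of_not_gt hnlt1)
    simp only [bne_iff_ne, ne_eq, not_not] at hnne
    rw [List.pairwise_cons] at h1 h2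
    have ih' := ih h1.2 h2.2
    have hb : (gv != av) = false := by simp [hnne]
    simp only [pvMergeScan, if_neg hnlt1, if_neg hnlt2, hb, Bool.false_eq_true, if_false,
      ih', pvAgree]
    constructor
    · intro h p hp q hq hek
      rcases List.mem_cons.1 hp with rfl | hp'
      · rcases List.mem_cons.1 hq with rfl | hq'
        · simp [hnne]
        · exact absurd hek (by subst hke; exact ne_of_lt (h2.1 q hq'))
      · rcases List.mem_cons.1 hq with rfl | hq'
        · exact absurd hek.symm (by subst hke; exact ne_of_lt (h1.1 p hp'))
        · exact h p hp' q hq' hek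
    · intro h p hp q hq hek
      exact h p (List.mem_cons_of_mem _ hp) q (List.mem_cons_of_mem _ hq) hek

-- sorting a dict's items by key yields a strictly key-increasing list
theorem sorted_items_strict (d : PySem.Dict String Int) (hnd : d.keys.Nodup) :
    (PySem.List.sorted d.items (fun p => p.1) false).Pairwise (fun a b => a.1 < b.1) := by
  have hle := PySem.List.sorted_pairwise (xs := d.items) (key := fun p : String × Int => p.1)
  have hperm : ((PySem.List.sorted d.items (fun p => p.1) false).map Prod.fst).Perm d.keys :=
    (PySem.List.sorted_perm _ _ _).map Prod.fst
  have hnd' : ((PySem.List.sorted d.items (fun p => p.1) false).map Prod.fst).Nodup :=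
    hperm.nodup_iff.2 hnd
  rw [List.nodup_iff_pairwise_ne, List.pairwise_map] at hnd'
  exact (hle.and hnd').imp (fun h => lt_of_le_of_ne h.1 h.2)

-- B = true ↔ the two dicts agree on every common key
theorem B_iff (gm aw : List (String × Int)) :
    check_exact_match_py_alt gm aw = true ↔
      pvAgree (PySem.Dict.ofList gm).items (PySem.Dict.ofList aw).items := by
  unfold check_exact_match_py_alt
  rw [show (fun p : String × Int => (p.1, p.2)) = id from funext (fun p => rfl), List.map_id]
  rw [mergeScan_iff _ _ (sorted_items_strict _ (PySem.Dict.nodup_keys_ofList gm))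
    (sorted_items_strict _ (PySem.Dict.nodup_keys_ofList aw))]
  unfold pvAgree
  constructor
  · intro h p hp q hq
    exact h p ((PySem.List.mem_sorted _ _ _ _).2 hp) q ((PySem.List.mem_sorted _ _ _ _).2 hq)
  · intro h p hp q hq
    exact h p ((PySem.List.mem_sorted _ _ _ _).1 hp) q ((PySem.List.mem_sorted _ _ _ _).1 hq)

-- A = true ↔ the same property
theorem A_iff (gm aw : List (String × Int)) :
    check_exact_match_py gm aw = true ↔
      pvAgree (PySem.Dict.ofList gm).items (PySem.Dict.ofList aw).items := by
  unfold check_exact_match_py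
  simp only [aw_lookup_eq]
  set gm_d := PySem.Dict.ofList gm with hgm
  set aw_d := PySem.Dict.ofList aw with haw
  have hndg : gm_d.keys.Nodup := PySem.Dict.nodup_keys_ofList gm
  have hnda : aw_d.keys.Nodup := PySem.Dict.nodup_keys_ofList aw
  have hmem : ∀ k, k ∈ PySem.List.sorted (PySem.Set.inter (PySem.Set.ofList gm_d.keys)
      (PySem.Set.ofList (aw_d.keys.map (fun k => k)))) (fun x => x) false ↔
      k ∈ gm_d.keys ∧ k ∈ aw_d.keys := by
    intro k
    rw [PySem.List.mem_sorted, PySem.Set.mem_inter, PySem.Set.mem_ofList, PySem.Set.mem_ofList]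
    simp
  split_ifs with h
  · rw [List.isEmpty_iff] at h
    simp only [true_iff]
    intro p hp q hq hek
    exfalso
    have hkk : p.1 ∈ gm_d.keys ∧ p.1 ∈ aw_d.keys :=
      ⟨PySem.Dict.mem_keys_of_mem_items _ hp, hek ▸ PySem.Dict.mem_keys_of_mem_items _ hq⟩
    have := (hmem p.1).2 hkk
    rw [h] at this
    exact (List.not_mem_nil).elim this
  · rw [List.all_eq_true]
    constructor
    · intro hall p hp q hq hek
      have hk : p.1 ∈ gm_d.keys ∧ p.1 ∈ aw_d.keys :=
        ⟨PySem.Dict.mem_keys_of_mem_items _ hp, hek ▸ PySem.Dict.mem_keys_of_mem_items _ hq⟩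
      have hb := hall p.1 ((hmem p.1).2 hk)
      rw [beq_iff_eq, PySem.Dict.getD_of_mem_items _ hp hndg, hek,
        PySem.Dict.getD_of_mem_items _ hq hnda] at hb
      exact hb
    · intro hagree k hk
      obtain ⟨hkg, hka⟩ := (hmem k).1 hk
      simp only [PySem.Dict.keys] at hkg hka
      obtain ⟨p, hp, rfl⟩ := List.mem_map.1 hkg
      obtain ⟨q, hq, hk2⟩ := List.mem_map.1 hka
      rw [beq_iff_eq, PySem.Dict.getD_of_mem_items _ hp hndg, ← hk2,
        PySem.Dict.getD_of_mem_items _ hq hnda]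
      exact hagree p hp q hq hk2.symm

theorem check_eq (gm aw : List (String × Int)) :
    check_exact_match_py gm aw = check_exact_match_py_alt gm aw := by
  rw [Bool.eq_iff_iff, A_iff, B_iff]

-- ===== VERDICT (by name: the statement is the Claim_ definition above) =====
theorem check_exact_match_py_spec : Claim_equal_check_exact_match_py := by
  intro gm aw _
  unfold Spec_check_exact_match_py
  exact check_eq gm aw
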